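-- pv_equiv track=rewrite | github.com/jacubthomas/leetcode | Interview_Questions/fb_hop.py | getSecondsRequired
-- ===== SOURCE A (Python) =====
-- from typing import List
--
-- def getSecondsRequired(N: int, F: int, P: List[int]) -> int:
--     # Handle trivial case - 1 frog
--     if F == 1:
--         return N - P[0]
--
--     # Sort the frogs from furthest lilypad -> closest to shore
--     P.sort()
--
--     # Stores result
--     hopCount = 0
--
--     # The most optimal approaches is for frogs to cluster together
--     clusterCoordinates = [P[0],P[0]]
--
--     # Get all the frogs in one mass
--     nextFrog = 1
--     while (clusterCoordinates[1] != P[len(P) - 1]):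
--         hopCount += clusterFrogs(P, clusterCoordinates, nextFrog)
--         nextFrog += 1
--
--     # Take final leaps
--     hopCount += (N - 1 - clusterCoordinates[1]) + F
--
--     return hopCount
--
-- def clusterFrogs(P: List[int], clusterCoordinates: List[int], nextFrog: int) -> int:
--     hopCount = 0
--     if P[nextFrog] - clusterCoordinates[1] > 1:
--         hopCount += P[nextFrog] - clusterCoordinates[1] - 1
--     clusterCoordinates[1] = P[nextFrog]
--     return hopCount
-- ===== SOURCE B (Python) =====
-- def getSecondsRequired(N, F, P):
--     # One pass over P: span minus (distinct-1) internal free moves, then final leaps.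
--     if F == 1:
--         return N - P[0]
--     mn = min(P)
--     mx = max(P)
--     d = len(set(P))
--     return (mx - mn) - (d - 1) + (N - 1 - mx) + F
-- ===== Notes on version B (the rewrite author's own statement) =====
-- stated objective: faster
-- what changed: Replaces sort + sequential clustering loop with a single-pass closed form: hops = (max-min) - (distinct-1) + (N-1-max) + F, computed via min/max/set.
import Mathlib
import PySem

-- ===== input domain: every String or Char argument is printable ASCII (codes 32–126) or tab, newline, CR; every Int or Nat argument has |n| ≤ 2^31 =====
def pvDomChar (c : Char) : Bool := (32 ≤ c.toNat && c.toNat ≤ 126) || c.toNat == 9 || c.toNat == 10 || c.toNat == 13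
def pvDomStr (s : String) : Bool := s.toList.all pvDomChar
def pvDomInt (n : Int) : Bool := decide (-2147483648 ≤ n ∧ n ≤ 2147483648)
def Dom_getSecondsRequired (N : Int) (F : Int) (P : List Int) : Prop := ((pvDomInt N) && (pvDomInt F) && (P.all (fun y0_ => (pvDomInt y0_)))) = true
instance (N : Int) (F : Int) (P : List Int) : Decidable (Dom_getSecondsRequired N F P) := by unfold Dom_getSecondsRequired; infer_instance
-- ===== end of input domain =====

-- B computes the hop count in one pass (min/max/distinct count) instead of sorting and
-- clustering frog by frog; equivalence is about the return value only — Python A also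
-- sorts P in place when F ≠ 1, which B does not do.

-- ===== PORT A =====
-- helper clusterFrogs: returns (hop increment, new clusterCoordinates[1])
def clusterFrogsA (P : List Int) (cluster1 : Int) (nextFrog : Nat) : Int × Int :=
  let p := (PySem.List.pyGet? P (nextFrog : Int)).getD 0
  ((if p - cluster1 > 1 then p - cluster1 - 1 else 0), p)

-- the while loop: returns (hopCount, final clusterCoordinates[1]); the index-bound guard
-- only makes the recursion total (Python's loop always exits via the equality test on
-- nonempty sorted input)
def loopA (P : List Int) (last : Int) (cluster1 : Int) (nextFrog : Nat) (acc : Int) : Int × Int :=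
  if cluster1 = last then (acc, cluster1)
  else if h : nextFrog < P.length then
    let step := clusterFrogsA P cluster1 nextFrog
    loopA P last step.2 (nextFrog + 1) (acc + step.1)
  else (acc, cluster1)
termination_by P.length - nextFrog
decreasing_by omega

def getSecondsRequired (N : Int) (F : Int) (P : List Int) : Int :=
  if F = 1 then N - (PySem.List.pyGet? P 0).getD 0
  else
    let S := PySem.List.sorted P (fun x => x) false
    let last := (PySem.List.pyGet? S ((S.length : Int) - 1)).getD 0
    let c0 := (PySem.List.pyGet? S 0).getD 0
    let r := loopA S last c0 1 0
    r.1 + (N - 1 - r.2) + F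

-- ===== PORT B =====
def getSecondsRequired_alt (N : Int) (F : Int) (P : List Int) : Int :=
  if F = 1 then N - (PySem.List.pyGet? P 0).getD 0
  else
    let mn := (PySem.List.min? P (fun x => x)).getD 0
    let mx := (PySem.List.max? P (fun x => x)).getD 0
    let d : Int := (PySem.Set.ofList P).length
    (mx - mn) - (d - 1) + (N - 1 - mx) + F

-- ===== PRECONDITION & SPEC =====
-- Pre_ excludes only the empty list, on which Python A raises IndexError (P[0]).
def Pre_getSecondsRequired (N : Int) (F : Int) (P : List Int) : Prop := P ≠ []
instance (N : Int) (F : Int) (P : List Int) : Decidable (Pre_getSecondsRequired N F P) := by unfold Pre_getSecondsRequired; infer_instance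
def pvWitness_getSecondsRequired : Int × Int × List Int := (10, 3, [1, 4, 4, 7])

def Spec_getSecondsRequired (N : Int) (F : Int) (P : List Int) (out : Int) : Prop := out = getSecondsRequired_alt N F P
instance (N : Int) (F : Int) (P : List Int) (out : Int) : Decidable (Spec_getSecondsRequired N F P out) := by unfold Spec_getSecondsRequired; infer_instance

-- ===== CLAIM (what is proved, stated in full; the proofs are below) =====
def Claim_equal_getSecondsRequired : Prop := ∀ (N : Int) (F : Int) (P : List Int), Dom_getSecondsRequired N F P → Pre_getSecondsRequired N F P → Spec_getSecondsRequired N F P (getSecondsRequired N F P)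

-- ===== LEMMAS AND PROOFS =====

-- structural version of the while loop, over the tail of the sorted list
def loopA' (last : Int) : List Int → Int → Int → Int × Int
  | [], c, acc => (acc, c)
  | x :: xs, c, acc =>
      if c = last then (acc, c)
      else loopA' last xs x (acc + (if x - c > 1 then x - c - 1 else 0))

-- number of strict increases along the chain c :: xs
def scount : Int → List Int → Int
  | _, [] => 0
  | c, x :: xs => (if c < x then 1 else 0) + scount x xs

theorem loopA_eq_loopA' (P : List Int) (last : Int) :
    ∀ (k n : Nat) (c acc : Int), P.length - n = k →
      loopA P last c n acc = loopA' last (P.drop n) c acc := by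
  intro k
  induction k with
  | zero =>
    intro n c acc hk
    have hn : P.length ≤ n := by omega
    rw [loopA]
    have hdrop : P.drop n = [] := List.drop_eq_nil_of_le hn
    by_cases hc : c = last
    · simp [hc, hdrop, loopA']
    · rw [if_neg hc, dif_neg (by omega)]
      simp [hdrop, loopA']
  | succ k ih =>
    intro n c acc hk
    have hn : n < P.length := by omega
    rw [loopA]
    have hd : P.drop n = P[n] :: P.drop (n + 1) := List.drop_eq_getElem_cons hn
    by_cases hc : c = last
    · rw [if_pos hc, hd]
      simp only [loopA', if_pos hc]
    · rw [if_neg hc, dif_pos hn, hd]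
      simp only [loopA', if_neg hc, clusterFrogsA]
      have hget : (PySem.List.pyGet? P (n : Int)).getD 0 = P[n] := by
        simp [PySem.List.pyGet?, PySem.List.pyIdx?, hn]
      rw [hget]
      exact ih (n + 1) P[n] (acc + (if P[n] - c > 1 then P[n] - c - 1 else 0)) (by omega)

-- a ≤-chain's last element bounds every element (used for max)
theorem le_getLast_of_pairwise (L : List Int) (h : L ≠ []) (hp : L.Pairwise (· ≤ ·)) :
    ∀ z ∈ L, z ≤ L.getLast h := by
  induction L with
  | nil => simp at h
  | cons a t iht =>
    intro z hz
    cases t with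
    | nil => simp at hz; simp [hz, List.getLast]
    | cons b u =>
      rw [List.getLast_cons (by simp)]
      rcases List.mem_cons.mp hz with rfl | hz'
      · exact le_trans ((List.pairwise_cons.mp hp).1 _ (List.getLast_mem _)) (le_refl _)
      · exact iht (by simp) (List.pairwise_cons.mp hp).2 z hz'

-- in a ≤-chain whose head equals its last element, all elements equal the head
theorem chain_const (c : Int) (xs : List Int) (hp : (c :: xs).Pairwise (· ≤ ·))
    (hl : (c :: xs).getLast (by simp) = c) : ∀ y ∈ xs, y = c := by
  intro y hy
  have hc : c ≤ y := (List.pairwise_cons.mp hp).1 y hy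
  have hle : y ≤ (c :: xs).getLast (by simp) :=
    le_getLast_of_pairwise (c :: xs) (by simp) hp y (List.mem_cons_of_mem _ hy)
  omega

theorem scount_zero_of_const (c : Int) (xs : List Int) (h : ∀ y ∈ xs, y = c) :
    scount c xs = 0 := by
  induction xs generalizing c with
  | nil => rfl
  | cons x t ih =>
    have hx : x = c := h x (by simp)
    have ht : scount c t = 0 := ih c (fun y hy => h y (List.mem_cons_of_mem _ hy))
    simp [scount, hx, ht]

theorem loopA'_closed (xs : List Int) : ∀ (c acc : Int),
    (c :: xs).Pairwise (· ≤ ·) →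
    loopA' ((c :: xs).getLast (by simp)) xs c acc =
      (acc + ((c :: xs).getLast (by simp) - c) - scount c xs, (c :: xs).getLast (by simp)) := by
  induction xs with
  | nil => intro c acc _; simp [loopA', List.getLast, scount]
  | cons x t ih =>
    intro c acc hp
    set last := (c :: x :: t).getLast (by simp) with hlastdef
    by_cases hc : c = last
    · have hconst : ∀ y ∈ x :: t, y = c := chain_const c (x :: t) hp hc.symm
      have hs : scount c (x :: t) = 0 := scount_zero_of_const c (x :: t) hconst
      simp [loopA', hs, ← hc]
    · have hlast' : last = (x :: t).getLast (by simp) := by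
        rw [hlastdef]; exact List.getLast_cons (by simp)
      have hcx : c ≤ x := (List.pairwise_cons.mp hp).1 x (by simp)
      have hrec := ih x (acc + (if x - c > 1 then x - c - 1 else 0)) (by
        rw [← hlast'] at *
        exact (List.pairwise_cons.mp hp).2)
      simp only [loopA', if_neg hc]
      rw [hlast', hrec, ← hlast', Prod.mk.injEq]
      refine ⟨?_, rfl⟩
      simp only [scount]
      split_ifs <;> omega

-- distinct count of a sorted chain = 1 + number of strict increases
theorem card_toFinset_chain (xs : List Int) : ∀ c : Int,
    (c :: xs).Pairwise (· ≤ ·) →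
    ((c :: xs).toFinset.card : Int) = scount c xs + 1 := by
  induction xs with
  | nil => intro c _; simp [scount]
  | cons x t ih =>
    intro c hp
    have hcx : c ≤ x := (List.pairwise_cons.mp hp).1 x (by simp)
    have htail := (List.pairwise_cons.mp hp).2
    have ihx := ih x htail
    by_cases hlt : c < x
    · have hnotin : c ∉ (x :: t).toFinset := by
        simp only [List.mem_toFinset]
        intro hmem
        have := (List.pairwise_cons.mp htail).1
        rcases List.mem_cons.mp hmem with rfl | hmem'
        · omega
        · have := (List.pairwise_cons.mp htail).1 c hmem'
          omega
      have : (c :: x :: t).toFinset.card = (x :: t).toFinset.card + 1 := by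
        simp only [List.toFinset_cons]
        exact Finset.card_insert_of_notMem (by simpa using hnotin)
      rw [this]
      push_cast
      simp only [scount, if_pos hlt]
      omega
    · have hcex : c = x := by omega
      have : (c :: x :: t).toFinset = (x :: t).toFinset := by
        simp [List.toFinset_cons, hcex]
      rw [this, ihx]
      simp only [scount, if_neg hlt]
      omega

-- ===== VERDICT (by name: the statement is the Claim_ definition above) =====
-- the two distinct counts agree: set(P) and the chain count on sorted(P)
theorem ofList_length_eq (P : List Int) (a : Int) (t : List Int)
    (hS : PySem.List.sorted P (fun x => x) false = a :: t) :
    ((PySem.Set.ofList P).length : Int) = scount a t + 1 := by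
  have hnd : (PySem.Set.ofList P).Nodup := PySem.Set.nodup_ofList P
  have hfs : (PySem.Set.ofList P).toFinset = (a :: t).toFinset := by
    apply Finset.ext
    intro y
    simp only [List.mem_toFinset, PySem.Set.mem_ofList]
    rw [← PySem.List.mem_sorted P (fun x => x) false y, hS]
  have hcard : (PySem.Set.ofList P).toFinset.card = (PySem.Set.ofList P).length :=
    List.toFinset_card_of_nodup hnd
  have hpair : (a :: t).Pairwise (· ≤ ·) := by
    have := PySem.List.sorted_pairwise P (fun x => x)
    rw [hS] at this
    exact this
  have := card_toFinset_chain t a hpair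
  rw [hfs] at hcard
  omega

theorem getSecondsRequired_spec : Claim_equal_getSecondsRequired := by
  intro N F P _ hP
  unfold Spec_getSecondsRequired getSecondsRequired getSecondsRequired_alt
  by_cases hF : F = 1
  · simp [hF]
  · rw [if_neg hF, if_neg hF]
    obtain ⟨a, t, hS⟩ : ∃ a t, PySem.List.sorted P (fun x => x) false = a :: t := by
      cases h : PySem.List.sorted P (fun x => x) false with
      | nil => exact absurd ((PySem.List.sorted_eq_nil_iff P (fun x => x) false).mp h) hP
      | cons a t => exact ⟨a, t, rfl⟩
    have hpair : (a :: t).Pairwise (· ≤ ·) := by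
      have := PySem.List.sorted_pairwise P (fun x => x)
      rw [hS] at this
      exact this
    set S := PySem.List.sorted P (fun x => x) false with hSdef
    set last := (a :: t).getLast (by simp) with hlastdef
    -- the two boundary reads of A
    have hlen : S.length = t.length + 1 := by rw [hS]; simp
    have hget_last : (PySem.List.pyGet? S ((S.length : Int) - 1)).getD 0 = last := by
      have h1 : ((S.length : Int) - 1) = ((t.length : Nat) : Int) := by rw [hlen]; push_cast; ring
      rw [h1, PySem.List.pyGet?_natCast]
      have h2 : t.length < S.length := by omega
      rw [List.getElem?_eq_getElem h2]
      simp only [Option.getD_some]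
      rw [hlastdef, List.getLast_eq_getElem]
      simp [hS]
    have hget_head : (PySem.List.pyGet? S 0).getD 0 = a := by
      have : (0 : Int) = ((0 : Nat) : Int) := rfl
      rw [this, PySem.List.pyGet?_natCast]
      rw [hS]
      rfl
    -- A's loop in closed form
    have hloop : loopA S last a 1 0 = (0 + (last - a) - scount a t, last) := by
      rw [loopA_eq_loopA' S last (S.length - 1) 1 a 0 rfl]
      have : S.drop 1 = t := by rw [hS]; rfl
      rw [this]
      exact loopA'_closed t a 0 hpair
    -- B's min is a
    have hmem_iff : ∀ y, y ∈ S ↔ y ∈ P := fun y => PySem.List.mem_sorted P (fun x => x) false y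
    have ha_mem : a ∈ P := (hmem_iff a).mp (by rw [hS]; simp)
    have hlast_mem : last ∈ P := (hmem_iff last).mp (by rw [hS, hlastdef]; exact List.getLast_mem _)
    have hmin : PySem.List.min? P (fun x => x) = some a := by
      cases hm : PySem.List.min? P (fun x => x) with
      | none => exact absurd ((PySem.List.min?_eq_none_iff P (fun x => x)).mp hm) hP
      | some m =>
        have hm_mem : m ∈ P := PySem.List.min?_mem hm
        have h1 : m ≤ a := PySem.List.min?_isMin hm a ha_mem
        have h2 : a ≤ m := PySem.List.key_head_sorted_le P (fun x => x) hS m hm_mem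
        rw [le_antisymm h1 h2]
    -- B's max is last
    have hmax : PySem.List.max? P (fun x => x) = some last := by
      cases hm : PySem.List.max? P (fun x => x) with
      | none => exact absurd ((PySem.List.max?_eq_none_iff P (fun x => x)).mp hm) hP
      | some m =>
        have hm_mem : m ∈ S := (hmem_iff m).mpr (PySem.List.max?_mem hm)
        have h1 : m ≤ last := by
          have hm' : m ∈ a :: t := by rw [← hS]; exact hm_mem
          exact hlastdef ▸ le_getLast_of_pairwise (a :: t) (by simp) hpair m hm'
        have h2 : last ≤ m := PySem.List.max?_isMax hm last hlast_mem
        rw [le_antisymm h2 h1]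
    -- B's distinct count
    have hd : ((PySem.Set.ofList P).length : Int) = scount a t + 1 := ofList_length_eq P a t hS
    simp only [hget_last, hget_head, hloop, hmin, hmax, Option.getD_some]
    omega
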